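-- pv_equiv track=rewrite | github.com/nny0ng/Network-Programming | assignment_2/2-all.py | special_bits
-- ===== SOURCE A (Python) =====
-- def special_bits(L=1, R=2, k=1):
--     num = -2
--     # Write your code between start and end for solution of problem 1
--     # Start
--     num = 0
--     for i in range(0, k):
--         num = num + 2**i
--     if not L <= num <= R:
--         num = -1
--     # End
--     return num
-- ===== SOURCE B (Python) =====
-- def special_bits(L=1, R=2, k=1):
--     # 2^k - 1 via binary exponentiation (square-and-multiply), O(log k) steps.
--     p, b, e = 1, 2, k
--     while e > 0:
--         if e & 1:
--             p *= b
--         b *= b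
--         e >>= 1
--     num = p - 1
--     return num if L <= num <= R else -1
-- ===== Notes on version B (the rewrite author's own statement) =====
-- stated objective: faster
-- what changed: Replaces A's O(k)-iteration summation of powers of two with square-and-multiply binary exponentiation computing 2^k in O(log k) multiplication steps, then subtracts 1.
import Mathlib
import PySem

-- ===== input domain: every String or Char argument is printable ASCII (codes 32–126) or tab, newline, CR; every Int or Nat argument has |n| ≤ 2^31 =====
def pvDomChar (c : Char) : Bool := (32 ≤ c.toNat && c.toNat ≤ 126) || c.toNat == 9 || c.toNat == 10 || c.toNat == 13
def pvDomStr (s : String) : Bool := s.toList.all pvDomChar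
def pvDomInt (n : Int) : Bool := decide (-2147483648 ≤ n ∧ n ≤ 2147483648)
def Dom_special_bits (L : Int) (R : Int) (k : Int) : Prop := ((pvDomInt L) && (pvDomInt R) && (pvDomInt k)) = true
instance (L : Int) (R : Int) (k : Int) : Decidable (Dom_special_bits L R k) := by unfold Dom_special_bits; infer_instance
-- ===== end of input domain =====

-- B computes 2^k by square-and-multiply binary exponentiation (O(log k) steps) instead of A's O(k) summation loop (objective: faster).

-- ===== PORT A =====
-- loop: num starts at 0; for i in range(0, k): num = num + 2**i  (i ≥ 0 in the loop, so 2**i = 2 ^ i.toNat exactly)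
def special_bits (L : Int) (R : Int) (k : Int) : Int :=
  let num : Int := 0
  let num := (PySem.List.pyRange 0 k 1).foldl (fun num i => num + 2 ^ i.toNat) num
  let num := if ¬ (L ≤ num ∧ num ≤ R) then -1 else num
  num

-- ===== PORT B =====
-- Python's `while e > 0` with e halved each step; e = k enters the loop only when k > 0,
-- so e is carried as the Nat k.toNat (k ≤ 0 gives 0: the loop body never runs, exactly as in Python).
def pvPowLoop (p : Int) (b : Int) (e : Nat) : Int :=
  if e = 0 then p
  else pvPowLoop (if e % 2 = 1 then p * b else p) (b * b) (e / 2)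
termination_by e
decreasing_by exact Nat.div_lt_self (Nat.pos_of_ne_zero (by assumption)) (by norm_num)

def special_bits_alt (L : Int) (R : Int) (k : Int) : Int :=
  let num : Int := pvPowLoop 1 2 k.toNat - 1
  if L ≤ num ∧ num ≤ R then num else -1

-- ===== PRECONDITION & SPEC =====
def Spec_special_bits (L : Int) (R : Int) (k : Int) (out : Int) : Prop := out = special_bits_alt L R k
instance (L : Int) (R : Int) (k : Int) (out : Int) : Decidable (Spec_special_bits L R k out) := by unfold Spec_special_bits; infer_instance

-- ===== CLAIM =====
def Claim_equal_special_bits : Prop := ∀ (L : Int) (R : Int) (k : Int), Dom_special_bits L R k → Spec_special_bits L R k (special_bits L R k)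

-- ===== LEMMAS AND PROOFS =====

theorem pvPowLoop_eq (e : Nat) : ∀ p b : Int, pvPowLoop p b e = p * b ^ e := by
  induction e using Nat.strong_induction_on with
  | _ e ih =>
    intro p b
    unfold pvPowLoop
    by_cases h : e = 0
    · simp [h]
    · simp only [h, if_false]
      rw [ih (e / 2) (Nat.div_lt_self (Nat.pos_of_ne_zero h) (by norm_num))]
      have hsq : (b * b) ^ (e / 2) = b ^ (2 * (e / 2)) := by
        rw [pow_mul]; ring_nf
      by_cases hm : e % 2 = 1
      · have he : e = 2 * (e / 2) + 1 := by omega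
        simp only [hm, if_true]
        have hb : b ^ e = b * (b * b) ^ (e / 2) := by
          rw [hsq, ← pow_succ', ← he]
        rw [hb]; ring
      · have he : e = 2 * (e / 2) := by omega
        simp only [hm, if_false]
        rw [hsq, ← he]
  
theorem pv_loop_closed (n : Nat) :
    (PySem.List.pyRange 0 (n : Int) 1).foldl (fun (num : Int) i => num + 2 ^ i.toNat) 0 = 2 ^ n - 1 := by
  induction n with
  | zero => simp [PySem.List.pyRange_one_eq_nil]
  | succ m ih =>
    have h : (0 : Int) ≤ (m : Int) := by positivity
    rw [show ((m + 1 : Nat) : Int) = (m : Int) + 1 by push_cast; ring,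
        PySem.List.pyRange_one_succ_right h, List.foldl_append, ih]
    simp
    ring

theorem pv_loop_eq (k : Int) :
    (PySem.List.pyRange 0 k 1).foldl (fun (num : Int) i => num + 2 ^ i.toNat) 0 = 2 ^ k.toNat - 1 := by
  by_cases h : k ≤ 0
  · rw [PySem.List.pyRange_one_eq_nil h]
    simp [Int.toNat_of_nonpos h]
  · rw [not_le] at h
    have hk : k = ((k.toNat : Nat) : Int) := by omega
    conv_lhs => rw [hk]
    rw [pv_loop_closed]

-- ===== VERDICT =====
theorem special_bits_spec : Claim_equal_special_bits := by
  intro L R k _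
  unfold Spec_special_bits
  simp only [special_bits, special_bits_alt, pv_loop_eq, pvPowLoop_eq, one_mul]
  split_ifs with h1 <;> rfl
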